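-- pv_equiv track=rewrite | github.com/goldsergeant/Algorithm-problem-solving | 프로그래머스/2/60058. 괄호 변환/괄호 변환.py | solution
-- ===== SOURCE A (Python) =====
-- def solution(p):
--     def is_right(string):
--         stack=[]
--         for char in string:
--             if char=='(':
--                 stack.append(char)
--             else:
--                 if not stack:
--                     return False
--                 stack.pop()
--         return len(stack)==0
--
--     def dfs(string):
--         if string=='':
--             return ''
--
--         left_cnt=0
--         right_cnt=0
--         idx=-1
--         for char in string:
--             idx+=1
--             if char=='(':
--                 left_cnt+=1
--             else:
--                 right_cnt+=1
--             if left_cnt==right_cnt: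
--                 break
--
--         u=string[:idx+1]
--         v=string[idx+1:] if idx<len(string)-1 else ''
--
--         if not is_right(u):
--             tmp=list(u[1:len(u)-1])
--             for i in range(len(tmp)):
--                 if tmp[i]=='(':
--                     tmp[i]=')'
--                 else:
--                     tmp[i]='('
--
--             return '('+dfs(v)+')'+''.join(tmp)
--         else:
--             return u+dfs(v)
--
--     return dfs(p)
-- ===== SOURCE B (Python) =====
-- def solution(p):
--     # Iterative single pass over primitive segments with index bookkeeping:
--     # collect prefix/suffix pieces and assemble once at the end (no recursion,
--     # no repeated slicing of the remainder).
--     pres = []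
--     sufs = []
--     i = 0
--     n = len(p)
--     while i < n:
--         bal = 0
--         j = i
--         while j < n:
--             bal += 1 if p[j] == '(' else -1
--             j += 1
--             if bal == 0:
--                 break
--         u = p[i:j]
--         if bal == 0 and u[0] == '(':
--             pres.append(u)
--             sufs.append('')
--         else:
--             flipped = ''.join(')' if c == '(' else '(' for c in u[1:-1])
--             pres.append('(')
--             sufs.append(')' + flipped)
--         i = j
--     return ''.join(pres) + ''.join(reversed(sufs))
-- ===== Notes on version B (the rewrite author's own statement) =====
-- stated objective: alternative
-- what changed: Replaces A's recursive dfs, which re-slices the remaining string and rebuilds the result at every level, with a single iterative scan that cuts the string into primitive segments via a running balance counter (segment correctness decided by the final balance and first character instead of a second stack-based pass) and assembles the answer once at the end from collected prefix/suffix pieces.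
import Mathlib
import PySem

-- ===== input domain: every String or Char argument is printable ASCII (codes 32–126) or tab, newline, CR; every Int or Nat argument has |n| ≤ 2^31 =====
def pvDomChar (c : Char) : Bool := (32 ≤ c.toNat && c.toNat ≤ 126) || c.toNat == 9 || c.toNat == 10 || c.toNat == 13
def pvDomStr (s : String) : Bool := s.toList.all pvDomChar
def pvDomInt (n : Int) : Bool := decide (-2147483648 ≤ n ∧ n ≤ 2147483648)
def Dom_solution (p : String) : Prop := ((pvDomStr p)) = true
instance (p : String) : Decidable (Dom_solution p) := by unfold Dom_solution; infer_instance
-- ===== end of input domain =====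

-- B replaces A's recursive dfs (which re-slices the remainder at every step) by one
-- iterative pass over primitive segments, collecting prefix/suffix pieces and
-- assembling the answer once at the end.


-- ===== PORT A =====

-- is_right: stack-based correctness check
def isRightAux : List Char → List Char → Bool
  | [], stack => stack.length == 0
  | c :: rest, stack =>
    if c = '(' then isRightAux rest ('(' :: stack)
    else match stack with
      | [] => false
      | _ :: st => isRightAux rest st

-- the for-loop of dfs finding the balanced split index; `idx` is the index of the
-- character currently examined (Python's idx after its increment); on normal loop
-- exit Python leaves idx = len-1, i.e. `idx - 1` here.
def findSplit : List Char → Nat → Nat → Nat → Nat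
  | [], _, _, idx => idx - 1
  | c :: rest, lc, rc, idx =>
    let lc' := if c = '(' then lc + 1 else lc
    let rc' := if c = '(' then rc else rc + 1
    if lc' = rc' then idx else findSplit rest lc' rc' (idx + 1)

def flipA (c : Char) : Char := if c = '(' then ')' else '('

-- dfs; u[1:len(u)-1] is ported as (drop 1).take (len-2), exact for these bounds
def dfsA : List Char → List Char
  | [] => []
  | c :: t =>
    let s := c :: t
    let idx := findSplit s 0 0 0
    let u := s.take (idx + 1)
    let v := s.drop (idx + 1)
    if isRightAux u [] then u ++ dfsA v
    else '(' :: dfsA v ++ ')' :: ((u.drop 1).take (u.length - 2)).map flipA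
termination_by s => s.length
decreasing_by
  all_goals simp only [List.length_drop, List.length_cons]; omega

def solution (p : String) : String := String.ofList (dfsA p.toList)

-- ===== PORT B =====

-- inner while loop of Source B: scan the remainder, returning (chars consumed, final balance)
def scanSeg : List Char → Int → Nat → Nat × Int
  | [], bal, j => (j, bal)
  | c :: rest, bal, j =>
    let bal' := bal + (if c = '(' then 1 else -1)
    if bal' = 0 then (j + 1, bal') else scanSeg rest bal' (j + 1)

theorem scanSeg_ge : ∀ (l : List Char) (bal : Int) (j : Nat), j ≤ (scanSeg l bal j).1 := by
  intro l
  induction l with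
  | nil => intro bal j; simp [scanSeg]
  | cons c rest ih =>
    intro bal j
    show j ≤ (if bal + (if c = '(' then (1:Int) else -1) = 0
        then (j + 1, bal + (if c = '(' then (1:Int) else -1))
        else scanSeg rest (bal + (if c = '(' then (1:Int) else -1)) (j + 1)).1
    by_cases h : bal + (if c = '(' then (1:Int) else -1) = 0
    · rw [if_pos h]; exact Nat.le_succ j
    · rw [if_neg h]; exact le_trans (Nat.le_succ j) (ih _ (j + 1))

theorem scanSeg_lt (c : Char) (rest : List Char) (bal : Int) (j : Nat) :
    j < (scanSeg (c :: rest) bal j).1 := by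
  show j < (if bal + (if c = '(' then (1:Int) else -1) = 0
      then (j + 1, bal + (if c = '(' then (1:Int) else -1))
      else scanSeg rest (bal + (if c = '(' then (1:Int) else -1)) (j + 1)).1
  by_cases h : bal + (if c = '(' then (1:Int) else -1) = 0
  · rw [if_pos h]; exact Nat.lt_succ_self j
  · rw [if_neg h]; exact lt_of_lt_of_le (Nat.lt_succ_self j) (scanSeg_ge rest _ (j + 1))

def flipB (c : Char) : Char := if c = '(' then ')' else '('

-- outer while loop of Source B over the remaining suffix; pres/sufs are the two piece
-- lists (accumulated in reverse), joined at the end (sufs in reversed order)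
def loopB : List Char → List (List Char) → List (List Char) → List Char
  | [], pres, sufs => pres.reverse.flatten ++ sufs.flatten
  | c :: t, pres, sufs =>
    let r := scanSeg (c :: t) 0 0
    let u := (c :: t).take r.1
    if r.2 = 0 ∧ c = '(' then
      loopB ((c :: t).drop r.1) (u :: pres) ([] :: sufs)
    else
      loopB ((c :: t).drop r.1) (['('] :: pres)
        ((')' :: ((u.drop 1).take (u.length - 2)).map flipB) :: sufs)
termination_by l => l.length
decreasing_by
  all_goals
    simp only [List.length_drop, List.length_cons]
    have := scanSeg_lt c t 0 0
    omega

def solution_alt (p : String) : String := String.ofList (loopB p.toList [] [])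

-- ===== PRECONDITION & SPEC =====
def Spec_solution (p : String) (out : String) : Prop := out = solution_alt p
instance (p : String) (out : String) : Decidable (Spec_solution p out) := by unfold Spec_solution; infer_instance

-- ===== CLAIM (what is proved, stated in full; the proofs are below) =====
def Claim_equal_solution : Prop := ∀ (p : String), Dom_solution p → Spec_solution p (solution p)

-- ===== LEMMAS AND PROOFS =====

theorem scanSeg_cons (c : Char) (rest : List Char) (bal : Int) (j : Nat) :
    scanSeg (c :: rest) bal j =
      (if bal + (if c = '(' then 1 else -1) = 0
       then (j + 1, bal + (if c = '(' then 1 else -1))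
       else scanSeg rest (bal + (if c = '(' then 1 else -1)) (j + 1)) := rfl

theorem findSplit_cons (c : Char) (rest : List Char) (lc rc idx : Nat) :
    findSplit (c :: rest) lc rc idx =
      (if (if c = '(' then lc + 1 else lc) = (if c = '(' then rc else rc + 1)
       then idx
       else findSplit rest (if c = '(' then lc + 1 else lc) (if c = '(' then rc else rc + 1) (idx + 1)) := rfl

-- depth-only version of is_right (the stack holds only '(' so only its length matters)
def isRightN : List Char → Nat → Bool
  | [], d => d == 0
  | c :: rest, d =>
    if c = '(' then isRightN rest (d + 1)
    else match d with
      | 0 => false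
      | d' + 1 => isRightN rest d'

theorem isRightAux_eq_isRightN : ∀ (l st : List Char), isRightAux l st = isRightN l st.length := by
  intro l
  induction l with
  | nil => intro st; rfl
  | cons c rest ih =>
    intro st
    simp only [isRightAux, isRightN]
    split
    · exact ih ('(' :: st)
    · cases st with
      | nil => rfl
      | cons x st' => simpa using ih st'

theorem findSplit_ge : ∀ (l : List Char) (lc rc idx : Nat), idx - 1 ≤ findSplit l lc rc idx := by
  intro l
  induction l with
  | nil => intro lc rc idx; simp [findSplit]
  | cons c rest ih =>
    intro lc rc idx
    rw [findSplit_cons]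
    by_cases h : (if c = '(' then lc + 1 else lc) = (if c = '(' then rc else rc + 1)
    · rw [if_pos h]; omega
    · rw [if_neg h]
      have := ih (if c = '(' then lc + 1 else lc) (if c = '(' then rc else rc + 1) (idx + 1)
      omega

-- findSplit and scanSeg cut the string at the same place (relative lengths)
theorem split_eq : ∀ (l : List Char) (lc rc idx j : Nat) (bal : Int),
    (lc : Int) - rc = bal → (l = [] → 1 ≤ idx) →
    findSplit l lc rc idx + 1 - idx = (scanSeg l bal j).1 - j := by
  intro l
  induction l with
  | nil =>
    intro lc rc idx j bal _ h
    have := h rfl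
    simp only [findSplit, scanSeg]
    omega
  | cons c rest ih =>
    intro lc rc idx j bal hbal _
    rw [findSplit_cons, scanSeg_cons]
    by_cases hc : c = '('
    · simp only [if_pos hc]
      by_cases he : lc + 1 = rc
      · have hb : bal + 1 = 0 := by omega
        rw [if_pos he, if_pos hb]
        omega
      · have hb : ¬ (bal + 1 = 0) := by omega
        rw [if_neg he, if_neg hb]
        have hrec := ih (lc + 1) rc (idx + 1) (j + 1) (bal + 1) (by omega) (by intro _; omega)
        have h1 := findSplit_ge rest (lc + 1) rc (idx + 1)
        have h2 := scanSeg_ge rest (bal + 1) (j + 1)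
        omega
    · simp only [if_neg hc]
      by_cases he : lc = rc + 1
      · have hb : bal + -1 = 0 := by omega
        rw [if_pos he, if_pos hb]
        omega
      · have hb : ¬ (bal + -1 = 0) := by omega
        rw [if_neg he, if_neg hb]
        have hrec := ih lc (rc + 1) (idx + 1) (j + 1) (bal + -1) (by omega) (by intro _; omega)
        have h1 := findSplit_ge rest lc (rc + 1) (idx + 1)
        have h2 := scanSeg_ge rest (bal + -1) (j + 1)
        omega

theorem split_eq_main (c : Char) (t : List Char) :
    findSplit (c :: t) 0 0 0 + 1 = (scanSeg (c :: t) 0 0).1 := by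
  have h := split_eq (c :: t) 0 0 0 0 0 (by norm_num) (by intro h; cases h)
  have h1 := findSplit_ge (c :: t) 0 0 0
  have h2 := scanSeg_ge (c :: t) 0 0
  have h3 := scanSeg_lt c t 0 0
  omega

-- the segment scanned from positive depth d is correct iff the final balance is 0
theorem isRightN_scan : ∀ (l : List Char) (d j : Nat), 0 < d →
    isRightN (l.take ((scanSeg l (d : Int) j).1 - j)) d = ((scanSeg l (d : Int) j).2 == 0) := by
  intro l
  induction l with
  | nil =>
    intro d j hd
    simp only [scanSeg, Nat.sub_self, List.take_zero, isRightN]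
    have h1 : ¬ ((d : Nat) = 0) := by omega
    simp [h1]
  | cons c rest ih =>
    intro d j hd
    rw [scanSeg_cons]
    by_cases hc : c = '('
    · have hb : ¬ ((d : Int) + (if c = '(' then (1:Int) else -1) = 0) := by
        rw [if_pos hc]; omega
      rw [if_neg hb]
      have hcast : (d : Int) + (if c = '(' then (1:Int) else -1) = ((d + 1 : Nat) : Int) := by
        rw [if_pos hc]; push_cast; ring
      rw [hcast]
      have hge := scanSeg_ge rest ((d + 1 : Nat) : Int) (j + 1)
      have h1 : (scanSeg rest ((d+1:Nat):Int) (j+1)).1 - j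
          = ((scanSeg rest ((d+1:Nat):Int) (j+1)).1 - (j+1)) + 1 := by omega
      rw [h1, List.take_succ_cons]
      simp only [isRightN, if_pos hc]
      exact ih (d + 1) (j + 1) (by omega)
    · by_cases hb : (d : Int) + (if c = '(' then (1:Int) else -1) = 0
      · have hd1 : d = 1 := by rw [if_neg hc] at hb; omega
        rw [if_pos hb, hb]
        have h1 : (j + 1, (0:Int)).1 - j = 1 := by simp
        rw [h1, List.take_succ_cons, List.take_zero]
        simp [isRightN, hc, hd1]
      · rw [if_neg hb]
        have hd2 : 2 ≤ d := by rw [if_neg hc] at hb; omega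
        have hcast : (d : Int) + (if c = '(' then (1:Int) else -1) = ((d - 1 : Nat) : Int) := by
          rw [if_neg hc]; omega
        rw [hcast]
        have hge := scanSeg_ge rest ((d - 1 : Nat) : Int) (j + 1)
        have h1 : (scanSeg rest ((d-1:Nat):Int) (j+1)).1 - j
            = ((scanSeg rest ((d-1:Nat):Int) (j+1)).1 - (j+1)) + 1 := by omega
        rw [h1, List.take_succ_cons]
        simp only [isRightN, if_neg hc]
        have hmatch : d = (d - 2) + 1 + 1 := by omega
        rw [hmatch]
        have hres := ih (d - 1) (j + 1) (by omega)
        have hd1 : (d - 2) + 1 = d - 1 := by omega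
        simp only []
        rw [hd1]
        exact hres

-- correctness test of the scanned segment, head '(' case
theorem isRight_seg_open (t : List Char) :
    isRightAux (('(' :: t).take ((scanSeg ('(' :: t) 0 0).1)) []
      = ((scanSeg ('(' :: t) 0 0).2 == 0) := by
  have hstep : scanSeg ('(' :: t) 0 0 = scanSeg t 1 1 := by
    rw [scanSeg_cons]; norm_num
  rw [hstep]
  have hge := scanSeg_ge t 1 1
  have h1 : (scanSeg t 1 1).1 = ((scanSeg t 1 1).1 - 1) + 1 := by omega
  rw [h1, List.take_succ_cons]
  have h2 : isRightAux ('(' :: t.take ((scanSeg t 1 1).1 - 1)) []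
      = isRightN (t.take ((scanSeg t 1 1).1 - 1)) 1 := by
    simp only [isRightAux, if_pos]
    simpa using isRightAux_eq_isRightN (t.take ((scanSeg t 1 1).1 - 1)) ['(']
  rw [h2]
  have hres := isRightN_scan t 1 1 (by omega)
  simpa using hres

-- correctness test, head ≠ '(' case: immediately false
theorem isRight_seg_closed (c : Char) (t : List Char) (hc : ¬ c = '(') (k : Nat) (hk : 1 ≤ k) :
    isRightAux ((c :: t).take k) [] = false := by
  have h1 : k = (k - 1) + 1 := by omega
  rw [h1, List.take_succ_cons]
  simp [isRightAux, hc]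

-- main loop invariant: loopB assembles exactly dfsA between the accumulated pieces
theorem loopB_eq_dfsA : ∀ (n : Nat) (s : List Char) (pres sufs : List (List Char)),
    s.length ≤ n →
    loopB s pres sufs = pres.reverse.flatten ++ dfsA s ++ sufs.flatten := by
  intro n
  induction n with
  | zero =>
    intro s pres sufs hlen
    have hs : s = [] := by
      cases s with
      | nil => rfl
      | cons c t => simp at hlen
    subst hs
    simp [loopB, dfsA]
  | succ m ih =>
    intro s pres sufs hlen
    cases s with
    | nil => simp [loopB, dfsA]
    | cons c t =>
      rw [loopB, dfsA]
      have hidx : findSplit (c :: t) 0 0 0 + 1 = (scanSeg (c :: t) 0 0).1 := split_eq_main c t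
      rw [hidx]
      have hlt := scanSeg_lt c t 0 0
      have hvlen : ((c :: t).drop (scanSeg (c :: t) 0 0).1).length ≤ m := by
        simp only [List.length_drop, List.length_cons]
        simp only [List.length_cons] at hlen
        omega
      have hcond : isRightAux ((c :: t).take (scanSeg (c :: t) 0 0).1) [] = true
          ↔ ((scanSeg (c :: t) 0 0).2 = 0 ∧ c = '(') := by
        by_cases hc : c = '('
        · subst hc
          rw [isRight_seg_open t]
          constructor
          · intro h; exact ⟨by simpa using h, rfl⟩
          · intro h; simp [h.1]
        · rw [isRight_seg_closed c t hc (scanSeg (c :: t) 0 0).1 (by omega)]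
          simp [hc]
      by_cases hcase : (scanSeg (c :: t) 0 0).2 = 0 ∧ c = '('
      · rw [if_pos hcase, if_pos (hcond.mpr hcase)]
        rw [ih ((c :: t).drop (scanSeg (c :: t) 0 0).1) _ _ hvlen]
        simp [List.append_assoc]
      · rw [if_neg hcase]
        have hfalse : isRightAux ((c :: t).take (scanSeg (c :: t) 0 0).1) [] = false := by
          rcases Bool.eq_false_or_eq_true (isRightAux ((c :: t).take (scanSeg (c :: t) 0 0).1) []) with h | h
          · exact absurd (hcond.mp h) hcase
          · exact h
        rw [if_neg (by simp [hfalse])]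
        rw [ih ((c :: t).drop (scanSeg (c :: t) 0 0).1) _ _ hvlen]
        have hflip : flipB = flipA := rfl
        simp [hflip, List.append_assoc]

theorem dfsA_eq_loopB (l : List Char) : dfsA l = loopB l [] [] := by
  rw [loopB_eq_dfsA l.length l [] [] le_rfl]
  simp

-- ===== VERDICT (by name: the statement is the Claim_ definition above) =====
theorem solution_spec : Claim_equal_solution := by
  intro p _
  unfold Spec_solution solution solution_alt
  rw [dfsA_eq_loopB]
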